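-- pv_equiv track=rewrite | github.com/leehyeonjin99/-yhw991228- | programmers/표 편집.py | solution
-- ===== SOURCE A (Python) =====
-- def solution(n, k, cmd):
--     linked_list = {i: [i-1, i+1] for i in range(n)}
--     linked_list[0] = [None, 1]
--     linked_list[n-1] = [n-2, None]
--     situation = ["O" for _ in range(n)]
--     recent = []
--     for command in cmd:
--         command = command.split()
--         if command[0] == 'U' or command[0] == 'D':
--             for _ in range(int(command[1])):
--                 k = linked_list[k][0] if command[0] == 'U' else linked_list[k][1]
--         if command[0] == 'C':
--             situation[k] = 'X'
--             prev, next = linked_list[k]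
--             recent.append([prev, k, next])
--             k = prev if next == None else next
--             if prev == None:
--                 linked_list[next][0] = None
--             elif next == None:
--                 linked_list[prev][1] = None
--             else:
--                 linked_list[next][0] = prev
--                 linked_list[prev][1] = next
--         if command[0] == 'Z':
--             prev, new, next = recent.pop()
--             situation[new] = 'O'
--             if prev == None:
--                 linked_list[next][0] = new
--             elif next == None:
--                 linked_list[prev][1] = new
--             else:
--                 linked_list[next][0] = new
--                 linked_list[prev][1] = new
--     return ''.join(situation)
-- ===== SOURCE B (Python) =====
-- def solution(n, k, cmd):
--     live = list(range(n))
--     pos = k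
--     situation = ["O"] * n
--     stack = []
--     for c in cmd:
--         parts = c.split()
--         op = parts[0]
--         if op == 'U':
--             x = int(parts[1])
--             if x > 0:
--                 pos -= x
--         elif op == 'D':
--             x = int(parts[1])
--             if x > 0:
--                 pos += x
--         elif op == 'C':
--             i = live.pop(pos)
--             situation[i] = 'X'
--             stack.append((pos, i))
--             if pos == len(live):
--                 pos -= 1
--         elif op == 'Z':
--             p, i = stack.pop()
--             live.insert(p, i)
--             situation[i] = 'O'
--             if p <= pos:
--                 pos += 1
--     return ''.join(situation)
-- ===== Notes on version B (the rewrite author's own statement) =====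
-- stated objective: alternative
-- what changed: Replaces the doubly-linked-list dict and per-step link walking with an ordered list of live row ids plus an integer cursor rank and a stack of (rank, id) deletions: a positive 'U x'/'D x' becomes a single cursor subtraction/addition instead of x link-walk steps.
-- outside the precondition, e.g. on solution(0, 0, ['U 1']): A returns '', B returns ''; on solution(-2, -3, ['U 1']): A returns '', B returns ''
import Mathlib
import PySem

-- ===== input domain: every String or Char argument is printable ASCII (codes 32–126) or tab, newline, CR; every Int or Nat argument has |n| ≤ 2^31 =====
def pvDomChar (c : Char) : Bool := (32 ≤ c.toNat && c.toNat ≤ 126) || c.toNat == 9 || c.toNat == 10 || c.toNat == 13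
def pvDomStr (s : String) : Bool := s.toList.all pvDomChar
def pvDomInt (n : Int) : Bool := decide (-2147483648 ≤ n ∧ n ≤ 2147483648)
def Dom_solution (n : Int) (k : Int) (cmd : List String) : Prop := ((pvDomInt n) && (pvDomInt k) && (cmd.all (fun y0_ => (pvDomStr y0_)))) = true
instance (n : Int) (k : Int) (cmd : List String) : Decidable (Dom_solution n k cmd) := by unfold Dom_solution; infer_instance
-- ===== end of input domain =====

-- B replaces A's doubly-linked-list dict and per-step link walking by an ordered list of live
-- row ids, an integer cursor rank and a stack of (rank, id) deletions (a positive 'U x'/'D x'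
-- becomes one cursor addition instead of a walk; an alternative data structure, not a
-- confirmed speedup).


-- ===== PORT A =====
-- A's state: (linked_list dict, situation, recent stack, cursor k).
-- Python's k can become None by walking off an end: modelled as Option Int.
-- Dict values are the two-element lists [prev, next] with None ↦ none.

-- linked_list[k][0] / [1] for a possibly-None cursor; Python raises KeyError on a None (or
-- absent) key — outside Pre_ — where we return none / leave the dict unchanged.
def pvLinkPrev (ll : PySem.Dict Int (Option Int × Option Int)) (kc : Option Int) : Option Int :=
  match kc with
  | some kk => (ll.getD kk (none, none)).1
  | none => none

def pvLinkNext (ll : PySem.Dict Int (Option Int × Option Int)) (kc : Option Int) : Option Int :=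
  match kc with
  | some kk => (ll.getD kk (none, none)).2
  | none => none

-- linked_list[t][0] = v  (resp. [1] = v); Python raises KeyError when t is None — outside Pre_.
def pvSetPrevAt (ll : PySem.Dict Int (Option Int × Option Int)) (t : Option Int) (v : Option Int) :
    PySem.Dict Int (Option Int × Option Int) :=
  match t with
  | some tt => ll.modify tt (none, none) (fun p => (v, p.2))
  | none => ll

def pvSetNextAt (ll : PySem.Dict Int (Option Int × Option Int)) (t : Option Int) (v : Option Int) :
    PySem.Dict Int (Option Int × Option Int) :=
  match t with
  | some tt => ll.modify tt (none, none) (fun p => (p.1, v))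
  | none => ll

-- one iteration of A's 'for command in cmd' loop
def pvStepA
    (st : PySem.Dict Int (Option Int × Option Int) × List String ×
          List (Option Int × Int × Option Int) × Option Int)
    (command : String) :
    PySem.Dict Int (Option Int × Option Int) × List String ×
    List (Option Int × Int × Option Int) × Option Int :=
  let ll := st.1
  let situation := st.2.1
  let recent := st.2.2.1
  let kc := st.2.2.2
  match PySem.Str.split₀ command with
  | [] => st                 -- Python: command[0] raises IndexError (outside Pre_)
  | c0 :: rest =>
    if c0 = "U" ∨ c0 = "D" then
      -- int(command[1]); missing or unparsable second token raises (outside Pre_)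
      let x := (PySem.Int.ofStr? (PySem.List.pyGetD rest 0 "")).getD 0
      let kc := (PySem.List.pyRange 0 x 1).foldl
        (fun kc _ => if c0 = "U" then pvLinkPrev ll kc else pvLinkNext ll kc) kc
      (ll, situation, recent, kc)
    else if c0 = "C" then
      match kc with
      | none => st           -- Python: situation[None] raises TypeError (outside Pre_)
      | some kk =>
        let situation := PySem.List.pySetD situation kk "X"
        let pn := ll.getD kk (none, none)
        -- Python appends to the end of `recent` and pops from the end: head = stack top here
        let recent := (pn.1, kk, pn.2) :: recent
        let kc := if pn.2 = none then pn.1 else pn.2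
        let ll :=
          if pn.1 = none then pvSetPrevAt ll pn.2 none
          else if pn.2 = none then pvSetNextAt ll pn.1 none
          else pvSetNextAt (pvSetPrevAt ll pn.2 pn.1) pn.1 pn.2
        (ll, situation, recent, kc)
    else if c0 = "Z" then
      match recent with
      | [] => st             -- Python: pop from empty list raises IndexError (outside Pre_)
      | (prev, nw, next) :: recent' =>
        let situation := PySem.List.pySetD situation nw "O"
        let ll :=
          if prev = none then pvSetPrevAt ll next (some nw)
          else if next = none then pvSetNextAt ll prev (some nw)
          else pvSetNextAt (pvSetPrevAt ll next (some nw)) prev (some nw)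
        (ll, situation, recent', kc)
    else st

def solution (n : Int) (k : Int) (cmd : List String) : String :=
  let ll : PySem.Dict Int (Option Int × Option Int) :=
    (PySem.List.pyRange 0 n 1).foldl
      (fun d i => d.insert i (some (i - 1), some (i + 1))) PySem.Dict.empty
  let ll := ll.insert 0 (none, some 1)
  let ll := ll.insert (n - 1) (some (n - 2), none)
  let situation : List String := (PySem.List.pyRange 0 n 1).map (fun _ => "O")
  let st := cmd.foldl pvStepA (ll, situation, [], some k)
  PySem.Str.join "" st.2.1

-- ===== PORT B =====
-- int(parts[1]); missing or unparsable token raises in Python (outside Pre_)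
def pvArgInt (rest : List String) : Int :=
  (PySem.Int.ofStr? (PySem.List.pyGetD rest 0 "")).getD 0

-- one iteration of B's loop; state = (live, pos, situation, stack).
-- A nonpositive move count is a no-op (B's reading of 'repeat x times', like A's range(x)).
def pvStepB (st : List Int × Int × List String × List (Int × Int)) (c : String) :
    List Int × Int × List String × List (Int × Int) :=
  let live := st.1
  let pos := st.2.1
  let situation := st.2.2.1
  let stack := st.2.2.2
  match PySem.Str.split₀ c with
  | [] => st                 -- Python: parts[0] raises IndexError (outside Pre_)
  | op :: rest =>
    if op = "U" then
      (live, (if 0 < pvArgInt rest then pos - pvArgInt rest else pos), situation, stack)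
    else if op = "D" then
      (live, (if 0 < pvArgInt rest then pos + pvArgInt rest else pos), situation, stack)
    else if op = "C" then
      match PySem.List.pop? live pos with
      | none => st           -- Python: live.pop(pos) raises IndexError (outside Pre_)
      | some (i, live') =>
        let situation := PySem.List.pySetD situation i "X"
        let stack := (pos, i) :: stack
        let pos := if pos = PySem.List.len live' then pos - 1 else pos
        (live', pos, situation, stack)
    else if op = "Z" then
      match stack with
      | [] => st             -- Python: stack.pop() raises IndexError (outside Pre_)
      | (p, i) :: stack' =>
        (PySem.List.insert live p i,
         (if p ≤ pos then pos + 1 else pos),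
         PySem.List.pySetD situation i "O", stack')
    else st

def solution_alt (n : Int) (k : Int) (cmd : List String) : String :=
  let live : List Int := PySem.List.pyRange 0 n 1
  let situation : List String := List.replicate n.toNat "O"
  let st := cmd.foldl pvStepB (live, k, situation, [])
  PySem.Str.join "" st.2.2.1

-- ===== PRECONDITION & SPEC =====
-- Validity checker for one command over the abstract state (cursor rank pos, live count m,
-- stack of deletion ranks). It marks exactly the commands A executes without raising:
-- a command must split into a nonempty token list; 'U x'/'D x' need a parsable second token
-- and (for x > 0; a nonpositive x is a no-op in both programs) a cursor on a live row that
-- walks at most one step past either end; 'C' needs a cursor on a live row and at least two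
-- live rows; 'Z' a nonempty stack.
-- Pre_ also restricts to starts with 1 ≤ n and 0 ≤ k < n (unless every command is harmless):
-- outside that range A raises on any effective command except on the degenerate n ≤ 0
-- starts, where A walks a leftover two-key dict and, when the walk survives, returns the
-- empty string — the same empty string B returns there (see claim.json cites).
def pvOk (sc : Option (Int × Int × List Int)) (c : String) : Option (Int × Int × List Int) :=
  match sc with
  | none => none
  | some (pos, m, ps) =>
    match PySem.Str.split₀ c with
    | [] => none
    | op :: rest =>
      if op = "U" ∨ op = "D" then
        match PySem.Int.ofStr? (PySem.List.pyGetD rest 0 "") with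
        | none => none
        | some x =>
          if x ≤ 0 then some (pos, m, ps)
          else if op = "U" then
            (if 0 ≤ pos ∧ pos < m ∧ -1 ≤ pos - x then some (pos - x, m, ps) else none)
          else
            (if 0 ≤ pos ∧ pos < m ∧ pos + x ≤ m then some (pos + x, m, ps) else none)
      else if op = "C" then
        if 0 ≤ pos ∧ pos < m ∧ 2 ≤ m then
          some ((if pos = m - 1 then pos - 1 else pos), m - 1, pos :: ps)
        else none
      else if op = "Z" then
        match ps with
        | [] => none
        | p :: ps' => some ((if p ≤ pos then pos + 1 else pos), m + 1, ps')
      else some (pos, m, ps)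

-- a command that provably changes no situation entry and raises nothing in A, whatever the
-- state: an unknown first token, or 'U x'/'D x' with a parsable x ≤ 0 (range(x) is empty)
def pvHarmlessB (c : String) : Bool :=
  match PySem.Str.split₀ c with
  | [] => false
  | op :: rest =>
    if op = "U" ∨ op = "D" then
      match PySem.Int.ofStr? (PySem.List.pyGetD rest 0 "") with
      | some x => decide (x ≤ 0)
      | none => false
    else decide (op ≠ "C" ∧ op ≠ "Z")

def Pre_solution (n : Int) (k : Int) (cmd : List String) : Prop :=
  (1 ≤ n ∧ 0 ≤ k ∧ k < n ∧ (cmd.foldl pvOk (some (k, n, []))).isSome = true) ∨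
    cmd.all pvHarmlessB = true

instance (n : Int) (k : Int) (cmd : List String) : Decidable (Pre_solution n k cmd) := by
  unfold Pre_solution; infer_instance

def pvWitness_solution : Int × Int × List String := (3, 1, ["C", "U 1", "Z", "D 2"])

def Spec_solution (n : Int) (k : Int) (cmd : List String) (out : String) : Prop := out = solution_alt n k cmd
instance (n : Int) (k : Int) (cmd : List String) (out : String) : Decidable (Spec_solution n k cmd out) := by unfold Spec_solution; infer_instance

-- ===== CLAIM (what is proved, stated in full; the proofs are below) =====
def Claim_equal_solution : Prop := ∀ (n : Int) (k : Int) (cmd : List String), Dom_solution n k cmd → Pre_solution n k cmd → Spec_solution n k cmd (solution n k cmd)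

-- ===== LEMMAS AND PROOFS =====

-- join of equal situation lists is equal, so the whole proof tracks a relation between
-- A's state (ll, situation, recent, kc) and B's state (live, pos, situation, stack).

-- A's dict: next pointer of rank r is the id at rank r+1; prev pointer of rank r > 0 is the
-- id at rank r-1 (the prev pointer of rank 0 is tracked separately, see pvHead).
def pvEnc (ll : PySem.Dict Int (Option Int × Option Int)) (live : List Int) : Prop :=
  ∀ r : Nat, r < live.length →
    (ll.getD (live.getD r 0) (none, none)).2 = live[r + 1]? ∧
    (0 < r → (ll.getD (live.getD r 0) (none, none)).1 = some (live.getD (r - 1) 0))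

-- prev pointer of the head is None — except possibly in the inert n = 1 start state
def pvHead (ll : PySem.Dict Int (Option Int × Option Int)) (live : List Int)
    (stack : List (Int × Int)) : Prop :=
  live ≠ [] → (2 ≤ live.length ∨ stack ≠ []) →
    (ll.getD (live.getD 0 0) (none, none)).1 = none

-- A's cursor is the id at B's cursor rank, unless the cursor has walked off an end
-- (rank -1 or rank = length), where its value is never used again.
def pvCur (kc : Option Int) (live : List Int) (pos : Int) : Prop :=
  (0 ≤ pos ∧ pos < (live.length : Int) ∧ kc = some (live.getD pos.toNat 0)) ∨
    pos = -1 ∨ pos = (live.length : Int)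

-- each A stack frame records the neighbours its id had at deletion time, i.e. the
-- neighbours it has in the list obtained by undoing the frames above it (LIFO)
def pvStackRel (ll : PySem.Dict Int (Option Int × Option Int)) :
    List (Option Int × Int × Option Int) → List (Int × Int) → List Int → Prop
  | [], [], _ => True
  | fa :: ra, pi :: rb, live =>
      0 ≤ pi.1 ∧ pi.1 ≤ (live.length : Int) ∧
      fa = ((if pi.1 = 0 then none else some (live.getD (pi.1.toNat - 1) 0)), pi.2,
            live[pi.1.toNat]?) ∧
      ll.getD pi.2 (none, none) = (fa.1, fa.2.2) ∧
      pvStackRel ll ra rb (live.take pi.1.toNat ++ pi.2 :: live.drop pi.1.toNat)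
  | _, _, _ => False

def pvRel (ll : PySem.Dict Int (Option Int × Option Int)) (sA : List String)
    (recent : List (Option Int × Int × Option Int)) (kc : Option Int)
    (live : List Int) (pos : Int) (sB : List String) (stack : List (Int × Int)) : Prop :=
  sA = sB ∧ 1 ≤ live.length ∧ (live ++ stack.map (·.2)).Nodup ∧
  pvEnc ll live ∧ pvHead ll live stack ∧ pvCur kc live pos ∧ pvStackRel ll recent stack live

-- ---- small index helpers ----

lemma pvGetD_eraseIdx (l : List Int) (r j : Nat) :
    (l.eraseIdx r).getD j 0 = if j < r then l.getD j 0 else l.getD (j + 1) 0 := by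
  simp only [List.getD_eq_getElem?_getD, List.getElem?_eraseIdx]
  split <;> rfl

lemma pvGet?_eraseIdx (l : List Int) (r j : Nat) :
    (l.eraseIdx r)[j]? = if j < r then l[j]? else l[j + 1]? :=
  List.getElem?_eraseIdx ..

lemma pvInsertAt_eq (l : List Int) (p : Nat) (x : Int) (hp : p ≤ l.length) :
    l.take p ++ x :: l.drop p = l.insertIdx p x := by
  induction l generalizing p with
  | nil =>
    have : p = 0 := by simpa using hp
    subst this; rfl
  | cons a t ih => cases p with
    | zero => simp [List.insertIdx]
    | succ q => simp [List.insertIdx_succ_cons, ih q (by simpa using hp)]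

lemma pvGet?_insertAt (l : List Int) (p : Nat) (x : Int) (j : Nat) (hp : p ≤ l.length) :
    (l.take p ++ x :: l.drop p)[j]? =
      if j < p then l[j]? else if j = p then some x else l[j - 1]? := by
  rw [pvInsertAt_eq l p x hp, List.getElem?_insertIdx]
  split
  · rfl
  · split
    · next h1 h2 => subst h2; simp [hp]
    · rfl

lemma pvGetD_insertAt (l : List Int) (p : Nat) (x : Int) (j : Nat) (hp : p ≤ l.length) :
    (l.take p ++ x :: l.drop p).getD j 0 =
      if j < p then l.getD j 0 else if j = p then x else l.getD (j - 1) 0 := by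
  simp only [List.getD_eq_getElem?_getD, pvGet?_insertAt l p x j hp]
  split
  · rfl
  · split <;> rfl

lemma pvLen_insertAt (l : List Int) (p : Nat) (x : Int) :
    (l.take p ++ x :: l.drop p).length = l.length + 1 := by
  simp only [List.length_append, List.length_take, List.length_cons, List.length_drop]
  omega

lemma pvGetD_ne_of_nodup {l : List Int} (h : l.Nodup) {i j : Nat}
    (hi : i < l.length) (hj : j < l.length) (hne : i ≠ j) :
    l.getD i 0 ≠ l.getD j 0 := by
  rw [List.getD_eq_getElem l 0 hi, List.getD_eq_getElem l 0 hj]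
  simp [List.Nodup.getElem_inj_iff h, hne]

lemma pvGetD_mem {l : List Int} {j : Nat} (h : j < l.length) : l.getD j 0 ∈ l := by
  rw [List.getD_eq_getElem l 0 h]; exact List.getElem_mem h

lemma pvInsert_erase (l : List Int) (r : Nat) (hr : r < l.length) :
    (l.eraseIdx r).take r ++ l.getD r 0 :: (l.eraseIdx r).drop r = l := by
  rw [List.eraseIdx_eq_take_drop_succ, List.getD_eq_getElem l 0 hr]
  have h1 : (l.take r ++ l.drop (r + 1)).take r = l.take r := by
    rw [List.take_append_of_le_length (by simp; omega), List.take_take]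
    simp
  have h2 : (l.take r ++ l.drop (r + 1)).drop r = l.drop (r + 1) := by
    rw [List.drop_append_of_le_length (by simp; omega)]
    simp [List.drop_take, show r - (l.take r).length = 0 by simp; omega]
  rw [h1, h2]
  conv_rhs => rw [← List.take_append_drop r l]
  congr 1
  rw [List.drop_eq_getElem_cons (by omega : r < l.length)]

-- ---- permutation / nodup maintenance ----

lemma pvNodup_C {live : List Int} {stack : List (Int × Int)} {r : Nat} {pos : Int}
    (h : (live ++ stack.map (·.2)).Nodup) (hr : r < live.length) :
    (live.eraseIdx r ++ ((pos, live.getD r 0) :: stack).map (·.2)).Nodup := by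
  have h1 : live.Perm (live.getD r 0 :: live.eraseIdx r) := by
    rw [List.getD_eq_getElem live 0 hr]
    exact (List.getElem_cons_eraseIdx_perm hr).symm
  have hperm : (live ++ stack.map (·.2)).Perm
      (live.eraseIdx r ++ ((pos, live.getD r 0) :: stack).map (·.2)) := by
    simp only [List.map_cons]
    exact (h1.append_right _).trans List.perm_middle.symm
  exact hperm.nodup h

lemma pvNodup_Z {live : List Int} {stack : List (Int × Int)} {p : Int} {i : Int}
    (h : (live ++ ((p, i) :: stack).map (·.2)).Nodup) :
    ((live.take p.toNat ++ i :: live.drop p.toNat) ++ stack.map (·.2)).Nodup := by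
  have h1 : (i :: live).Perm (live.take p.toNat ++ i :: live.drop p.toNat) := by
    conv_lhs => rw [← List.take_append_drop p.toNat live]
    exact List.perm_middle.symm
  have hperm : (live ++ ((p, i) :: stack).map (·.2)).Perm
      ((live.take p.toNat ++ i :: live.drop p.toNat) ++ stack.map (·.2)) := by
    simp only [List.map_cons]
    exact List.perm_middle.trans (h1.append_right _)
  exact hperm.nodup h

-- ---- stack relation congruence ----

lemma pvStackRel_congr {ll ll' : PySem.Dict Int (Option Int × Option Int)} :
    ∀ (ra : List (Option Int × Int × Option Int)) (rb : List (Int × Int)) (live : List Int),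
      pvStackRel ll ra rb live →
      (∀ x ∈ rb, ll'.getD x.2 (none, none) = ll.getD x.2 (none, none)) →
      pvStackRel ll' ra rb live := by
  intro ra
  induction ra with
  | nil => intro rb live h hsame; cases rb with
    | nil => trivial
    | cons b rb => exact absurd h (by simp [pvStackRel])
  | cons fa ra ih =>
    intro rb live h hsame
    cases rb with
    | nil => exact absurd h (by simp [pvStackRel])
    | cons pi rb =>
      obtain ⟨h1, h2, h3, h4, h5⟩ := h
      exact ⟨h1, h2, h3, by rw [hsame pi (by simp)]; exact h4,
        ih rb _ h5 (fun x hx => hsame x (by simp [hx]))⟩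

-- ---- cursor walking ----

lemma pvFoldConst {α β : Type} (l : List β) (f : α → α) (a : α) :
    l.foldl (fun a _ => f a) a = f^[l.length] a := by
  induction l generalizing a with
  | nil => rfl
  | cons x t ih => simp [List.foldl_cons, ih, Function.iterate_succ_apply]

lemma pvWalkU {ll : PySem.Dict Int (Option Int × Option Int)} {live : List Int}
    (henc : pvEnc ll live) :
    ∀ (x r : Nat), r < live.length → x ≤ r →
      (fun kc => pvLinkPrev ll kc)^[x] (some (live.getD r 0)) =
        some (live.getD (r - x) 0) := by
  intro x
  induction x with
  | zero => intro r _ _; simp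
  | succ y ih =>
    intro r hr hx
    rw [Function.iterate_succ_apply]
    have hstep : pvLinkPrev ll (some (live.getD r 0)) = some (live.getD (r - 1) 0) := by
      simp only [pvLinkPrev]
      rw [(henc r hr).2 (by omega)]
    rw [hstep]
    rw [ih (r - 1) (by omega) (by omega)]
    congr 2
    omega

lemma pvWalkD {ll : PySem.Dict Int (Option Int × Option Int)} {live : List Int}
    (henc : pvEnc ll live) :
    ∀ (x r : Nat), r + x < live.length →
      (fun kc => pvLinkNext ll kc)^[x] (some (live.getD r 0)) =
        some (live.getD (r + x) 0) := by
  intro x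
  induction x with
  | zero => intro r _; simp
  | succ y ih =>
    intro r hr
    rw [Function.iterate_succ_apply]
    have hstep : pvLinkNext ll (some (live.getD r 0)) = some (live.getD (r + 1) 0) := by
      simp only [pvLinkNext]
      rw [(henc r (by omega)).1]
      rw [List.getD_eq_getElem?_getD, List.getElem?_eq_getElem (l := live) (by omega)]
      rfl
    rw [hstep]
    rw [ih (r + 1) (by omega)]
    congr 2
    omega

-- ---- effect of a C command on the dict ----

lemma pvC_dict {ll : PySem.Dict Int (Option Int × Option Int)} {live : List Int} {r : Nat}
    (hnd : live.Nodup) (henc : pvEnc ll live)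
    (hhead : (ll.getD (live.getD 0 0) (none, none)).1 = none)
    (hr : r < live.length) (hlen : 2 ≤ live.length) :
    let pn := ll.getD (live.getD r 0) (none, none)
    let ll' := if pn.1 = none then pvSetPrevAt ll pn.2 none
               else if pn.2 = none then pvSetNextAt ll pn.1 none
               else pvSetNextAt (pvSetPrevAt ll pn.2 pn.1) pn.1 pn.2
    pvEnc ll' (live.eraseIdx r) ∧
    ((live.eraseIdx r) ≠ [] → (ll'.getD ((live.eraseIdx r).getD 0 0) (none, none)).1 = none) ∧
    (∀ j, j ∉ live.eraseIdx r → ll'.getD j (none, none) = ll.getD j (none, none)) := by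
  intro pn ll'
  have hlen' : (live.eraseIdx r).length = live.length - 1 := List.length_eraseIdx_of_lt hr
  have hpn2 : pn.2 = live[r + 1]? := (henc r hr).1
  have hne : ∀ i j : Nat, i < live.length → j < live.length → i ≠ j →
      live.getD i 0 ≠ live.getD j 0 := fun i j hi hj hij => pvGetD_ne_of_nodup hnd hi hj hij
  by_cases hr0 : r = 0
  · -- delete the head: prev is None, set prev of the new head to None
    subst hr0
    have hpn1 : pn.1 = none := hhead
    have hnx : pn.2 = some (live.getD 1 0) := by
      rw [hpn2, List.getElem?_eq_getElem (by omega), List.getD_eq_getElem live 0 (by omega)]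
    have hll' : ll' = ll.modify (live.getD 1 0) (none, none) (fun p => (none, p.2)) := by
      simp only [ll', hpn1, hnx, pvSetPrevAt]
      simp
    have hget : ∀ j, ll'.getD j (none, none) =
        if j = live.getD 1 0 then (none, (ll.getD (live.getD 1 0) (none, none)).2)
        else ll.getD j (none, none) := by
      intro j; rw [hll', PySem.Dict.getD_modify]
    refine ⟨?_, ?_, ?_⟩
    · intro r' hr'
      have hid : (live.eraseIdx 0).getD r' 0 = live.getD (r' + 1) 0 := by
        rw [pvGetD_eraseIdx]; simp
      have hnext : (live.eraseIdx 0)[r' + 1]? = live[r' + 2]? := by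
        rw [pvGet?_eraseIdx]; simp
      rcases Nat.eq_zero_or_pos r' with h0 | hpos
      · subst h0
        rw [hid, hget, if_pos rfl]
        refine ⟨?_, by omega⟩
        rw [hnext]
        exact (henc 1 (by omega)).1
      · have hneq : live.getD (r' + 1) 0 ≠ live.getD 1 0 :=
          hne _ _ (by omega) (by omega) (by omega)
        rw [hid, hget, if_neg hneq]
        constructor
        · rw [hnext]; exact (henc (r' + 1) (by omega)).1
        · intro _
          rw [(henc (r' + 1) (by omega)).2 (by omega), pvGetD_eraseIdx, if_neg (by omega)]
          have h3 : r' + 1 - 1 = r' := by omega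
          have h4 : r' - 1 + 1 = r' := by omega
          rw [h3, h4]
    · intro hne'
      have h0 : (live.eraseIdx 0).getD 0 0 = live.getD 1 0 := by
        rw [pvGetD_eraseIdx]; simp
      rw [h0, hget, if_pos rfl]
    · intro j hj
      have : live.getD 1 0 ∈ live.eraseIdx 0 := by
        have := pvGetD_mem (l := live.eraseIdx 0) (j := 0) (by omega)
        rwa [pvGetD_eraseIdx] at this
      rw [hget, if_neg (fun he => hj (by rwa [he]))]
  · by_cases hrl : r = live.length - 1
    · -- delete the tail: next is None, set next of the new tail to None
      have hpn1 : pn.1 = some (live.getD (r - 1) 0) := (henc r hr).2 (by omega)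
      have hpn2n : pn.2 = none := by
        rw [hpn2, List.getElem?_eq_none]; omega
      have hll' : ll' = ll.modify (live.getD (r - 1) 0) (none, none) (fun p => (p.1, none)) := by
        simp only [ll', hpn1, hpn2n, pvSetNextAt]
        rfl
      have hget : ∀ j, ll'.getD j (none, none) =
          if j = live.getD (r - 1) 0 then ((ll.getD (live.getD (r - 1) 0) (none, none)).1, none)
          else ll.getD j (none, none) := by
        intro j; rw [hll', PySem.Dict.getD_modify]
      refine ⟨?_, ?_, ?_⟩
      · intro r' hr'
        have hid : (live.eraseIdx r).getD r' 0 = live.getD r' 0 := by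
          rw [pvGetD_eraseIdx, if_pos (by omega)]
        rcases eq_or_ne r' (r - 1) with hrr | hrr
        · subst hrr
          rw [hid, hget, if_pos rfl]
          constructor
          · rw [pvGet?_eraseIdx, if_neg (by omega), List.getElem?_eq_none (by omega)]
          · intro hpos
            show (ll.getD (live.getD (r - 1) 0) (none, none)).1 = _
            rw [(henc (r - 1) (by omega)).2 hpos, pvGetD_eraseIdx, if_pos (by omega)]
        · have hneq : live.getD r' 0 ≠ live.getD (r - 1) 0 :=
            hne _ _ (by omega) (by omega) (by omega)
          rw [hid, hget, if_neg hneq]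
          constructor
          · rw [pvGet?_eraseIdx, if_pos (by omega)]
            exact (henc r' (by omega)).1
          · intro hpos
            rw [(henc r' (by omega)).2 hpos]
            congr 1
            rw [pvGetD_eraseIdx, if_pos (by omega)]
      · intro hne'
        have h0 : (live.eraseIdx r).getD 0 0 = live.getD 0 0 := by
          rw [pvGetD_eraseIdx, if_pos (by omega)]
        rw [h0, hget]
        split
        · next h => show (ll.getD (live.getD (r - 1) 0) (none, none)).1 = none
                    rw [← h]; exact hhead
        · exact hhead
      · intro j hj
        have : live.getD (r - 1) 0 ∈ live.eraseIdx r := by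
          have := pvGetD_mem (l := live.eraseIdx r) (j := r - 1) (by omega)
          rwa [pvGetD_eraseIdx, if_pos (by omega)] at this
        rw [hget, if_neg (fun he => hj (by rwa [he]))]
    · -- delete in the middle: rewire both neighbours
      have hpn1 : pn.1 = some (live.getD (r - 1) 0) := (henc r hr).2 (by omega)
      have hpn2s : pn.2 = some (live.getD (r + 1) 0) := by
        rw [hpn2, List.getElem?_eq_getElem (by omega), List.getD_eq_getElem live 0 (by omega)]
      have hpvnx : live.getD (r - 1) 0 ≠ live.getD (r + 1) 0 :=
        hne _ _ (by omega) (by omega) (by omega)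
      have hll' : ll' = (ll.modify (live.getD (r + 1) 0) (none, none)
            (fun p => (pn.1, p.2))).modify (live.getD (r - 1) 0) (none, none)
            (fun p => (p.1, pn.2)) := by
        simp only [ll', hpn1, hpn2s, pvSetPrevAt, pvSetNextAt]
        simp
      have hget : ∀ j, ll'.getD j (none, none) =
          if j = live.getD (r - 1) 0 then ((ll.getD (live.getD (r - 1) 0) (none, none)).1, pn.2)
          else if j = live.getD (r + 1) 0 then (pn.1, (ll.getD (live.getD (r + 1) 0) (none, none)).2)
          else ll.getD j (none, none) := by
        intro j
        rw [hll']
        by_cases h1 : j = live.getD (r - 1) 0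
        · rw [PySem.Dict.getD_modify, if_pos h1, PySem.Dict.getD_modify, if_neg hpvnx,
            if_pos h1]
        · rw [PySem.Dict.getD_modify, if_neg h1, PySem.Dict.getD_modify, if_neg h1]
      refine ⟨?_, ?_, ?_⟩
      · intro r' hr'
        have hid : (live.eraseIdx r).getD r' 0 =
            if r' < r then live.getD r' 0 else live.getD (r' + 1) 0 := pvGetD_eraseIdx ..
        rcases eq_or_ne r' (r - 1) with hrr | hrr
        · subst hrr
          rw [hid, if_pos (by omega), hget, if_pos rfl]
          constructor
          · show pn.2 = _
            rw [hpn2s, pvGet?_eraseIdx, if_neg (by omega),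
              List.getElem?_eq_getElem (l := live) (show r - 1 + 1 + 1 < live.length by omega),
              List.getD_eq_getElem live 0 (by omega)]
            congr 2
            omega
          · intro hpos
            show (ll.getD (live.getD (r - 1) 0) (none, none)).1 = _
            rw [(henc (r - 1) (by omega)).2 hpos, pvGetD_eraseIdx, if_pos (by omega)]
        · rcases eq_or_ne r' r with hrr2 | hrr2
          · subst hrr2
            rw [hid, if_neg (by omega), hget,
              if_neg (hne _ _ (by omega) (by omega) (by omega)), if_pos rfl]
            constructor
            · show (ll.getD (live.getD (r' + 1) 0) (none, none)).2 = _
              rw [pvGet?_eraseIdx, if_neg (by omega)]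
              exact (henc (r' + 1) (by omega)).1
            · intro hpos
              show pn.1 = _
              rw [hpn1, pvGetD_eraseIdx, if_pos (by omega)]
          · -- far from the deleted rank: nothing changed
            by_cases hlt : r' < r
            · rw [hid, if_pos hlt, hget,
                if_neg (hne _ _ (by omega) (by omega) (by omega)),
                if_neg (hne _ _ (by omega) (by omega) (by omega))]
              constructor
              · rw [pvGet?_eraseIdx, if_pos (by omega)]
                exact (henc r' (by omega)).1
              · intro hpos
                rw [(henc r' (by omega)).2 hpos]
                congr 1
                rw [pvGetD_eraseIdx, if_pos (by omega)]
            · rw [hid, if_neg hlt, hget,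
                if_neg (hne _ _ (by omega) (by omega) (by omega)),
                if_neg (hne _ _ (by omega) (by omega) (by omega))]
              constructor
              · rw [pvGet?_eraseIdx, if_neg (by omega)]
                exact (henc (r' + 1) (by omega)).1
              · intro hpos
                rw [(henc (r' + 1) (by omega)).2 (by omega), pvGetD_eraseIdx, if_neg (by omega)]
                have h3 : r' + 1 - 1 = r' := by omega
                have h4 : r' - 1 + 1 = r' := by omega
                rw [h3, h4]
      · intro hne'
        have h0 : (live.eraseIdx r).getD 0 0 = live.getD 0 0 := by
          rw [pvGetD_eraseIdx, if_pos (by omega)]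
        rw [h0, hget]
        split
        · next h => show (ll.getD (live.getD (r - 1) 0) (none, none)).1 = none
                    rw [← h]; exact hhead
        · split
          · next h2 =>
            exact absurd h2 (hne _ _ (by omega) (by omega) (by omega))
          · exact hhead
      · intro j hj
        have hm1 : live.getD (r - 1) 0 ∈ live.eraseIdx r := by
          have := pvGetD_mem (l := live.eraseIdx r) (j := r - 1) (by omega)
          rwa [pvGetD_eraseIdx, if_pos (by omega)] at this
        have hm2 : live.getD (r + 1) 0 ∈ live.eraseIdx r := by
          have := pvGetD_mem (l := live.eraseIdx r) (j := r) (by omega)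
          rwa [pvGetD_eraseIdx, if_neg (by omega)] at this
        rw [hget, if_neg (fun he => hj (by rwa [he])), if_neg (fun he => hj (by rwa [he]))]

-- ---- effect of a Z command on the dict ----

lemma pvMem_insertAt {l : List Int} {p : Nat} {x j : Int} :
    j ∈ l.take p ++ x :: l.drop p ↔ j = x ∨ j ∈ l := by
  conv_rhs => rw [← List.take_append_drop p l]
  simp only [List.mem_append, List.mem_cons]
  tauto

lemma pvZ_dict {ll : PySem.Dict Int (Option Int × Option Int)} {live : List Int} {p : Nat}
    {i : Int} (hnd : live.Nodup) (hi : i ∉ live) (henc : pvEnc ll live)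
    (hhead : (ll.getD (live.getD 0 0) (none, none)).1 = none)
    (hfr : ll.getD i (none, none) =
      ((if p = 0 then none else some (live.getD (p - 1) 0)), live[p]?))
    (hp : p ≤ live.length) (hlen : 1 ≤ live.length) :
    let prevO : Option Int := if p = 0 then none else some (live.getD (p - 1) 0)
    let nextO : Option Int := live[p]?
    let ll' := if prevO = none then pvSetPrevAt ll nextO (some i)
               else if nextO = none then pvSetNextAt ll prevO (some i)
               else pvSetNextAt (pvSetPrevAt ll nextO (some i)) prevO (some i)
    let live' := live.take p ++ i :: live.drop p
    pvEnc ll' live' ∧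
    (ll'.getD (live'.getD 0 0) (none, none)).1 = none ∧
    (∀ j, j ∉ live' → ll'.getD j (none, none) = ll.getD j (none, none)) := by
  intro prevO nextO ll' live'
  have hlen' : live'.length = live.length + 1 := pvLen_insertAt ..
  have hne : ∀ a b : Nat, a < live.length → b < live.length → a ≠ b →
      live.getD a 0 ≠ live.getD b 0 := fun a b ha hb hab => pvGetD_ne_of_nodup hnd ha hb hab
  have hmem : ∀ a : Nat, a < live.length → live.getD a 0 ∈ live' := by
    intro a ha
    exact pvMem_insertAt.2 (Or.inr (pvGetD_mem ha))
  have hid' : ∀ j : Nat, live'.getD j 0 =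
      if j < p then live.getD j 0 else if j = p then i else live.getD (j - 1) 0 :=
    fun j => pvGetD_insertAt live p i j hp
  have hget' : ∀ j : Nat, live'[j]? =
      if j < p then live[j]? else if j = p then some i else live[j - 1]? :=
    fun j => pvGet?_insertAt live p i j hp
  have hine : ∀ a : Nat, a < live.length → i ≠ live.getD a 0 := by
    intro a ha he
    exact hi (he ▸ pvGetD_mem ha)
  by_cases hp0 : p = 0
  · -- reinsert at the head: set prev of the old head to the new id
    subst hp0
    have hnx : nextO = some (live.getD 0 0) := by
      show live[0]? = _
      rw [List.getElem?_eq_getElem (by omega), List.getD_eq_getElem live 0 (by omega)]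
    have hll' : ll' = ll.modify (live.getD 0 0) (none, none) (fun q => (some i, q.2)) := by
      simp only [ll', prevO, hnx, pvSetPrevAt]
      simp
    have hget : ∀ j, ll'.getD j (none, none) =
        if j = live.getD 0 0 then (some i, (ll.getD (live.getD 0 0) (none, none)).2)
        else ll.getD j (none, none) := by
      intro j; rw [hll', PySem.Dict.getD_modify]
    refine ⟨?_, ?_, ?_⟩
    · intro r' hr'
      rcases Nat.eq_zero_or_pos r' with h0 | h0
      · subst h0
        rw [hid' 0, if_neg (by omega), if_pos rfl, hget, if_neg (hine 0 (by omega)), hfr]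
        exact ⟨by rw [hget' 1]; simp, fun h => absurd h (lt_irrefl 0)⟩
      · rcases eq_or_ne r' 1 with h1 | h1
        · subst h1
          rw [hid' 1, if_neg (by omega), if_neg (by omega), hget, if_pos rfl]
          constructor
          · rw [hget' 2, if_neg (by omega), if_neg (by omega)]
            exact (henc 0 (by omega)).1
          · intro _
            rw [hid' 0, if_neg (by omega), if_pos rfl]
        · rw [hid' r', if_neg (by omega), if_neg (by omega), hget,
            if_neg (hne _ _ (by omega) (by omega) (by omega))]
          constructor
          · rw [hget' (r' + 1), if_neg (by omega), if_neg (by omega)]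
            have h6 : (ll.getD (live.getD (r' - 1) 0) (none, none)).2 = live[r' - 1 + 1]? :=
              (henc (r' - 1) (by omega)).1
            rw [h6]
            congr 1
            omega
          · intro _
            rw [(henc (r' - 1) (by omega)).2 (by omega), hid' (r' - 1), if_neg (by omega),
              if_neg (by omega)]
    · rw [hid' 0, if_neg (by omega), if_pos rfl, hget, if_neg (hine 0 (by omega)), hfr]
      simp
    · intro j hj
      rw [hget, if_neg (fun he => hj (by rw [he]; exact hmem 0 (by omega)))]
  · by_cases hpl : p = live.length
    · -- reinsert at the tail: set next of the old tail to the new id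
      have hprev : prevO = some (live.getD (p - 1) 0) := if_neg hp0
      have hnxn : nextO = none := by
        show live[p]? = none
        rw [List.getElem?_eq_none]; omega
      have hll' : ll' = ll.modify (live.getD (p - 1) 0) (none, none)
          (fun q => (q.1, some i)) := by
        simp only [ll', prevO, nextO, hnxn, if_neg hp0, pvSetNextAt]
        simp [hp0]
      have hget : ∀ j, ll'.getD j (none, none) =
          if j = live.getD (p - 1) 0 then ((ll.getD (live.getD (p - 1) 0) (none, none)).1, some i)
          else ll.getD j (none, none) := by
        intro j; rw [hll', PySem.Dict.getD_modify]
      refine ⟨?_, ?_, ?_⟩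
      · intro r' hr'
        rcases eq_or_ne r' p with h0 | h0
        · subst h0
          rw [hid' r', if_neg (by omega), if_pos rfl, hget, if_neg (hine _ (by omega)), hfr]
          constructor
          · rw [hget' (r' + 1)]
            simp [show ¬(r' + 1 < r') from by omega, show r' + 1 ≠ r' from by omega,
              List.getElem?_eq_none (show live.length ≤ r' + 1 - 1 by omega)]
          · intro hpos
            show (if r' = 0 then none else some (live.getD (r' - 1) 0) : Option Int) =
              some (live'.getD (r' - 1) 0)
            rw [if_neg hp0, hid' (r' - 1), if_pos (by omega)]
        · rcases eq_or_ne r' (p - 1) with h1 | h1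
          · subst h1
            rw [hid' (p - 1), if_pos (by omega), hget, if_pos rfl]
            constructor
            · rw [hget' (p - 1 + 1), if_neg (by omega), if_pos (by omega)]
            · intro hpos
              rw [(henc (p - 1) (by omega)).2 hpos, hid' (p - 1 - 1), if_pos (by omega)]
          · rw [hid' r', if_pos (by omega), hget,
              if_neg (hne _ _ (by omega) (by omega) (by omega))]
            constructor
            · rw [hget' (r' + 1), if_pos (by omega)]
              exact (henc r' (by omega)).1
            · intro hpos
              rw [(henc r' (by omega)).2 hpos, hid' (r' - 1), if_pos (by omega)]
      · rw [hid' 0, if_pos (by omega), hget]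
        split
        · next h => show (ll.getD (live.getD (p - 1) 0) (none, none)).1 = none
                    rw [← h]; exact hhead
        · exact hhead
      · intro j hj
        rw [hget, if_neg (fun he => hj (by rw [he]; exact hmem (p - 1) (by omega)))]
    · -- reinsert in the middle: rewire both neighbours to the new id
      have hprev : prevO = some (live.getD (p - 1) 0) := if_neg hp0
      have hnx : nextO = some (live.getD p 0) := by
        show live[p]? = _
        rw [List.getElem?_eq_getElem (by omega), List.getD_eq_getElem live 0 (by omega)]
      have hpvnx : live.getD (p - 1) 0 ≠ live.getD p 0 :=
        hne _ _ (by omega) (by omega) (by omega)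
      have hll' : ll' = (ll.modify (live.getD p 0) (none, none)
          (fun q => (some i, q.2))).modify (live.getD (p - 1) 0) (none, none)
          (fun q => (q.1, some i)) := by
        simp only [ll', prevO, nextO, hprev, hnx, pvSetPrevAt, pvSetNextAt]
        simp [hp0]
      have hget : ∀ j, ll'.getD j (none, none) =
          if j = live.getD (p - 1) 0 then
            ((ll.getD (live.getD (p - 1) 0) (none, none)).1, some i)
          else if j = live.getD p 0 then (some i, (ll.getD (live.getD p 0) (none, none)).2)
          else ll.getD j (none, none) := by
        intro j
        rw [hll']
        by_cases h1 : j = live.getD (p - 1) 0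
        · rw [PySem.Dict.getD_modify, if_pos h1, PySem.Dict.getD_modify, if_neg hpvnx,
            if_pos h1]
        · rw [PySem.Dict.getD_modify, if_neg h1, PySem.Dict.getD_modify, if_neg h1]
      refine ⟨?_, ?_, ?_⟩
      · intro r' hr'
        rcases eq_or_ne r' p with h0 | h0
        · subst h0
          rw [hid' r', if_neg (by omega), if_pos rfl, hget, if_neg (hine _ (by omega)),
            if_neg (hine _ (by omega)), hfr]
          constructor
          · show live[r']? = _
            rw [hget' (r' + 1), if_neg (by omega), if_neg (by omega)]
            have h4 : r' + 1 - 1 = r' := by omega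
            rw [h4]
          · intro hpos
            show (if r' = 0 then none else some (live.getD (r' - 1) 0) : Option Int) =
              some (live'.getD (r' - 1) 0)
            rw [if_neg hp0, hid' (r' - 1), if_pos (by omega)]
        · rcases eq_or_ne r' (p - 1) with h1 | h1
          · subst h1
            rw [hid' (p - 1), if_pos (by omega), hget, if_pos rfl]
            constructor
            · rw [hget' (p - 1 + 1), if_neg (by omega), if_pos (by omega)]
            · intro hpos
              rw [(henc (p - 1) (by omega)).2 hpos, hid' (p - 1 - 1), if_pos (by omega)]
          · rcases eq_or_ne r' (p + 1) with h2 | h2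
            · subst h2
              have h5 : p + 1 - 1 = p := by omega
              rw [hid' (p + 1), if_neg (by omega), if_neg (by omega), h5, hget,
                if_neg (hne _ _ (by omega) (by omega) (by omega)), if_pos rfl]
              constructor
              · rw [hget' (p + 1 + 1), if_neg (by omega), if_neg (by omega)]
                rw [(henc p (by omega)).1]
                congr 2
              · intro _
                show some i = some (live'.getD (p + 1 - 1) 0)
                rw [h5, hid' p, if_neg (by omega), if_pos rfl]
            · by_cases hlt : r' < p
              · rw [hid' r', if_pos (by omega), hget,
                  if_neg (hne _ _ (by omega) (by omega) (by omega)),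
                  if_neg (hne _ _ (by omega) (by omega) (by omega))]
                constructor
                · rw [hget' (r' + 1), if_pos (by omega)]
                  exact (henc r' (by omega)).1
                · intro hpos
                  rw [(henc r' (by omega)).2 hpos, hid' (r' - 1), if_pos (by omega)]
              · rw [hid' r', if_neg (by omega), if_neg (by omega), hget,
                  if_neg (hne _ _ (by omega) (by omega) (by omega)),
                  if_neg (hne _ _ (by omega) (by omega) (by omega))]
                constructor
                · rw [hget' (r' + 1), if_neg (by omega), if_neg (by omega)]
                  have h6 : (ll.getD (live.getD (r' - 1) 0) (none, none)).2 =
                      live[r' - 1 + 1]? := (henc (r' - 1) (by omega)).1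
                  rw [h6]
                  congr 1
                  omega
                · intro _
                  rw [(henc (r' - 1) (by omega)).2 (by omega), hid' (r' - 1), if_neg (by omega),
                    if_neg (by omega)]
      · rw [hid' 0, if_pos (by omega), hget]
        split
        · next h => show (ll.getD (live.getD (p - 1) 0) (none, none)).1 = none
                    rw [← h]; exact hhead
        · split
          · next h2 =>
            exact absurd h2 (hne _ _ (by omega) (by omega) (by omega))
          · exact hhead
      · intro j hj
        rw [hget, if_neg (fun he => hj (by rw [he]; exact hmem (p - 1) (by omega))),
          if_neg (fun he => hj (by rw [he]; exact hmem p (by omega)))]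

-- ---- misc helpers for the step lemma ----

lemma pvNot_mem_eraseIdx {l : List Int} (hnd : l.Nodup) {r : Nat} (hr : r < l.length) :
    l.getD r 0 ∉ l.eraseIdx r := by
  intro hmem
  obtain ⟨j, hj, hje⟩ := List.mem_iff_getElem.1 hmem
  have hlen := List.length_eraseIdx_of_lt hr
  have h1 : (l.eraseIdx r)[j]? = some (l.getD r 0) := by
    rw [List.getElem?_eq_getElem hj, hje]
  rw [pvGet?_eraseIdx] at h1
  split at h1
  · next h =>
    rw [List.getElem?_eq_getElem (show j < l.length by omega)] at h1
    have h2 := pvGetD_ne_of_nodup hnd (show j < l.length by omega) hr (show j ≠ r by omega)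
    rw [List.getD_eq_getElem l 0 (show j < l.length by omega)] at h2
    exact h2 (congrArg (fun o => o.getD 0) h1)
  · next h =>
    rw [List.getElem?_eq_getElem (show j + 1 < l.length by omega)] at h1
    have h2 := pvGetD_ne_of_nodup hnd (show j + 1 < l.length by omega) hr
      (show j + 1 ≠ r by omega)
    rw [List.getD_eq_getElem l 0 (show j + 1 < l.length by omega)] at h2
    exact h2 (congrArg (fun o => o.getD 0) h1)

lemma pvDisjoint {live : List Int} {ids : List Int} (h : (live ++ ids).Nodup) :
    ∀ x ∈ ids, x ∉ live := by
  intro x hx hxl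
  exact (List.disjoint_of_nodup_append h) hxl hx

-- ---- the per-command simulation step ----

lemma pvStep_rel {ll : PySem.Dict Int (Option Int × Option Int)} {sA : List String}
    {recent : List (Option Int × Int × Option Int)} {kc : Option Int} {live : List Int}
    {pos : Int} {sB : List String} {stack : List (Int × Int)} {c : String}
    {sc' : Int × Int × List Int}
    (hrel : pvRel ll sA recent kc live pos sB stack)
    (hok : pvOk (some (pos, (live.length : Int), stack.map (·.1))) c = some sc') :
    pvRel (pvStepA (ll, sA, recent, kc) c).1 (pvStepA (ll, sA, recent, kc) c).2.1
      (pvStepA (ll, sA, recent, kc) c).2.2.1 (pvStepA (ll, sA, recent, kc) c).2.2.2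
      (pvStepB (live, pos, sB, stack) c).1 (pvStepB (live, pos, sB, stack) c).2.1
      (pvStepB (live, pos, sB, stack) c).2.2.1 (pvStepB (live, pos, sB, stack) c).2.2.2 ∧
    sc' = ((pvStepB (live, pos, sB, stack) c).2.1,
      ((pvStepB (live, pos, sB, stack) c).1.length : Int),
      (pvStepB (live, pos, sB, stack) c).2.2.2.map (·.1)) := by
  obtain ⟨hS, hlen1, hnd, henc, hhead, hcur, hsr⟩ := hrel
  cases hsplit : PySem.Str.split₀ c with
  | nil =>
    simp only [pvOk, hsplit] at hok
    simp at hok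
  | cons op rest =>
    simp only [pvOk, hsplit] at hok
    by_cases hUD : op = "U" ∨ op = "D"
    · -- navigation
      rw [if_pos hUD] at hok
      cases hx : PySem.Int.ofStr? (PySem.List.pyGetD rest 0 "") with
      | none =>
        rw [hx] at hok
        dsimp only at hok
        simp at hok
      | some x =>
        rw [hx] at hok
        dsimp only at hok
        have hA : pvStepA (ll, sA, recent, kc) c = (ll, sA, recent,
            (PySem.List.pyRange 0 x 1).foldl
              (fun kc _ => if op = "U" then pvLinkPrev ll kc else pvLinkNext ll kc) kc) := by
          rw [pvStepA, hsplit]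
          simp only [if_pos hUD, hx, Option.getD_some]
        have hB : pvStepB (live, pos, sB, stack) c =
            (live, (if op = "U" then (if 0 < x then pos - x else pos)
                    else (if 0 < x then pos + x else pos)), sB, stack) := by
          rw [pvStepB, hsplit]
          rcases hUD with h | h
          · simp [h, pvArgInt, hx]
          · by_cases h2 : op = "U"
            · simp [h2, pvArgInt, hx]
            · simp [h, h2, pvArgInt, hx]
        rw [hA, hB]
        have hiter : (PySem.List.pyRange 0 x 1).foldl
            (fun kc _ => if op = "U" then pvLinkPrev ll kc else pvLinkNext ll kc) kc =
            (fun kc => if op = "U" then pvLinkPrev ll kc else pvLinkNext ll kc)^[x.toNat] kc := by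
          rw [pvFoldConst, PySem.List.length_pyRange_one]
          congr 1
          omega
        by_cases hx0 : x ≤ 0
        · -- both programs treat a nonpositive move count as a no-op
          rw [if_pos hx0] at hok
          have hxt : x.toNat = 0 := by omega
          have hposB : (if op = "U" then (if 0 < x then pos - x else pos)
              else (if 0 < x then pos + x else pos)) = pos := by
            split <;> rw [if_neg (by omega)]
          rw [hposB]
          simp only [hiter, hxt, Function.iterate_zero, id_eq]
          exact ⟨⟨hS, hlen1, hnd, henc, hhead, hcur, hsr⟩, by injection hok with h; rw [← h]⟩
        · rw [if_neg hx0] at hok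
          have hxp : (0 : Int) < x := by omega
          rcases hUD with hU | hD
          · -- U x, x > 0
            subst hU
            rw [if_pos rfl] at hok
            split at hok
            · next hcond =>
              obtain ⟨hp0, hpm, hb⟩ := hcond
              have hkc : kc = some (live.getD pos.toNat 0) := by
                rcases hcur with ⟨_, _, h⟩ | h | h
                · exact h
                · omega
                · omega
              injection hok with hok'
              simp only [if_pos rfl, if_true, if_pos hxp] at hiter ⊢
              refine ⟨⟨hS, hlen1, hnd, henc, hhead, ?_, hsr⟩, by rw [← hok']⟩
              by_cases hend : pos - x = -1
              · exact Or.inr (Or.inl hend)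
              · left
                refine ⟨by omega, by omega, ?_⟩
                rw [hiter, hkc,
                  pvWalkU henc x.toNat pos.toNat (by omega) (by omega)]
                congr 2
                omega
            · simp at hok
          · -- D x, x > 0
            subst hD
            rw [if_neg (by decide)] at hok
            split at hok
            · next hcond =>
              obtain ⟨hp0, hpm, hb⟩ := hcond
              have hkc : kc = some (live.getD pos.toNat 0) := by
                rcases hcur with ⟨_, _, h⟩ | h | h
                · exact h
                · omega
                · omega
              injection hok with hok'
              simp only [if_neg (show ("D" : String) ≠ "U" by decide), if_pos hxp] at hiter ⊢
              refine ⟨⟨hS, hlen1, hnd, henc, hhead, ?_, hsr⟩, by rw [← hok']⟩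
              by_cases hend : pos + x = (live.length : Int)
              · exact Or.inr (Or.inr hend)
              · left
                refine ⟨by omega, by omega, ?_⟩
                rw [hiter, hkc,
                  pvWalkD henc x.toNat pos.toNat (by omega)]
                congr 2
                omega
            · simp at hok
    · rw [if_neg hUD] at hok
      by_cases hC : op = "C"
      · -- delete the cursor row
        rw [if_pos hC] at hok
        split at hok
        · next hcond =>
          obtain ⟨hp0, hpm, h2⟩ := hcond
          have hkc : kc = some (live.getD pos.toNat 0) := by
            rcases hcur with ⟨_, _, h⟩ | h | h
            · exact h
            · omega
            · omega
          injection hok with hok'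
          have hndl : live.Nodup := hnd.of_append_left
          have hhead' : (ll.getD (live.getD 0 0) (none, none)).1 = none :=
            hhead (by intro h; rw [h] at hlen1; simp at hlen1) (Or.inl (by omega))
          have hpop : PySem.List.pop? live pos =
              some (live.getD pos.toNat 0, live.eraseIdx pos.toNat) := by
            have h1 : PySem.List.pop? live ((pos.toNat : Nat) : Int) =
                some (live[pos.toNat], live.eraseIdx pos.toNat) :=
              PySem.List.pop?_natCast live pos.toNat (by omega)
            rw [show ((pos.toNat : Nat) : Int) = pos from by omega] at h1
            rw [h1, List.getD_eq_getElem live 0 (by omega)]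
          have hB : pvStepB (live, pos, sB, stack) c = (live.eraseIdx pos.toNat,
              (if pos = PySem.List.len (live.eraseIdx pos.toNat) then pos - 1 else pos),
              PySem.List.pySetD sB (live.getD pos.toNat 0) "X",
              (pos, live.getD pos.toNat 0) :: stack) := by
            rw [pvStepB, hsplit]
            have hCne : op ≠ "U" := by intro h; rw [h] at hC; exact absurd hC (by decide)
            have hCne2 : op ≠ "D" := by intro h; rw [h] at hC; exact absurd hC (by decide)
            simp [hCne, hCne2, hC, hpop]
          have hA : pvStepA (ll, sA, recent, kc) c =
              (let pn := ll.getD (live.getD pos.toNat 0) (none, none)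
               ((if pn.1 = none then pvSetPrevAt ll pn.2 none
                 else if pn.2 = none then pvSetNextAt ll pn.1 none
                 else pvSetNextAt (pvSetPrevAt ll pn.2 pn.1) pn.1 pn.2),
                PySem.List.pySetD sA (live.getD pos.toNat 0) "X",
                (pn.1, live.getD pos.toNat 0, pn.2) :: recent,
                (if pn.2 = none then pn.1 else pn.2))) := by
            rw [pvStepA, hsplit]
            simp only [if_neg hUD, if_pos hC, hkc]
          rw [hA, hB]
          dsimp only
          have hC_dict := pvC_dict hndl henc hhead' (show pos.toNat < live.length by omega)
            (by omega)
          obtain ⟨hEnc', hHead', hUnch⟩ := hC_dict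
          have hlen' : (live.eraseIdx pos.toNat).length = live.length - 1 :=
            List.length_eraseIdx_of_lt (by omega)
          have hpn2 : (ll.getD (live.getD pos.toNat 0) (none, none)).2 =
              live[pos.toNat + 1]? := (henc pos.toNat (by omega)).1
          have hkkmem : live.getD pos.toNat 0 ∉ live.eraseIdx pos.toNat :=
            pvNot_mem_eraseIdx hndl (by omega)
          refine ⟨⟨by rw [hS], by omega, pvNodup_C hnd (by omega), hEnc', ?_, ?_, ?_⟩, ?_⟩
          · -- pvHead
            intro h1 _
            exact hHead' h1
          · -- pvCur
            by_cases hlast : pos.toNat = live.length - 1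
            · have hpn2n : (ll.getD (live.getD pos.toNat 0) (none, none)).2 = none := by
                rw [hpn2, List.getElem?_eq_none]; omega
              have hpn1 : (ll.getD (live.getD pos.toNat 0) (none, none)).1 =
                  some (live.getD (pos.toNat - 1) 0) := (henc pos.toNat (by omega)).2 (by omega)
              have hc2 : (if pos = PySem.List.len (live.eraseIdx pos.toNat) then pos - 1
                  else pos) = pos - 1 := by
                rw [PySem.List.len_eq, hlen', if_pos (by omega)]
              left
              rw [hpn2n, if_pos rfl, hpn1, hc2]
              refine ⟨by omega, by omega, ?_⟩
              rw [pvGetD_eraseIdx, if_pos (by omega)]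
              congr 2
              omega
            · have hpn2s : (ll.getD (live.getD pos.toNat 0) (none, none)).2 =
                  some (live.getD (pos.toNat + 1) 0) := by
                rw [hpn2, List.getElem?_eq_getElem (by omega),
                  List.getD_eq_getElem live 0 (by omega)]
              have hc2 : (if pos = PySem.List.len (live.eraseIdx pos.toNat) then pos - 1
                  else pos) = pos := by
                rw [PySem.List.len_eq, hlen', if_neg (by omega)]
              left
              rw [hpn2s, hc2, if_neg (by simp)]
              refine ⟨by omega, by omega, ?_⟩
              rw [pvGetD_eraseIdx, if_neg (by omega)]
          · -- pvStackRel
            refine ⟨hp0, by rw [hlen']; omega, ?_, ?_, ?_⟩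
            · have hnexteq : (ll.getD (live.getD pos.toNat 0) (none, none)).2 =
                  (live.eraseIdx pos.toNat)[pos.toNat]? := by
                rw [hpn2, pvGet?_eraseIdx, if_neg (by omega)]
              by_cases hps : pos = 0
              · have hp1 : (ll.getD (live.getD pos.toNat 0) (none, none)).1 = none := by
                  rw [show pos.toNat = 0 by omega]; exact hhead'
                rw [if_pos hps, hp1, hnexteq]
              · have hpn1 : (ll.getD (live.getD pos.toNat 0) (none, none)).1 =
                    some (live.getD (pos.toNat - 1) 0) :=
                  (henc pos.toNat (by omega)).2 (by omega)
                rw [if_neg hps, hpn1, hnexteq, pvGetD_eraseIdx, if_pos (by omega)]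
            · rw [hUnch _ hkkmem]
            · rw [pvInsert_erase live pos.toNat (by omega)]
              exact pvStackRel_congr recent stack live hsr
                (fun y hy => hUnch y.2 (fun hmem =>
                  pvDisjoint hnd y.2 (List.mem_map_of_mem (f := fun q => q.2) hy)
                    (List.eraseIdx_subset hmem)))
          · -- checker state agrees
            rw [← hok',
              show PySem.List.len (live.eraseIdx pos.toNat) = (live.length : Int) - 1 from by
                rw [PySem.List.len_eq, hlen']; omega,
              show (((live.eraseIdx pos.toNat).length : Nat) : Int) =
                  (live.length : Int) - 1 from by rw [hlen']; omega, List.map_cons]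
        · exact absurd hok (by simp)
      · by_cases hZ : op = "Z"
        · -- restore the most recent deletion
          rw [if_neg hC, if_pos hZ] at hok
          cases stack with
          | nil => rw [List.map_nil] at hok; exact absurd hok (by simp)
          | cons pi stack' =>
            cases recent with
            | nil => exact absurd hsr (by cases pi; simp [pvStackRel])
            | cons fa recent' =>
              obtain ⟨p, i⟩ := pi
              obtain ⟨fprev, fnw, fnext⟩ := fa
              obtain ⟨hq0, hqlen, hfa, hfget, hsr'⟩ := hsr
              dsimp only at hq0 hqlen hfa hfget hsr'
              rw [Prod.mk.injEq, Prod.mk.injEq] at hfa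
              obtain ⟨hfa1, hfa2, hfa3⟩ := hfa
              rw [List.map_cons] at hok
              injection hok with hok'
              have hndl : live.Nodup := hnd.of_append_left
              have hip : i ∉ live := pvDisjoint hnd i (by simp)
              have hhead' : (ll.getD (live.getD 0 0) (none, none)).1 = none :=
                hhead (by intro h; rw [h] at hlen1; simp at hlen1) (Or.inr (by simp))
              have hprevEq : fprev = (if p.toNat = 0 then none
                  else some (live.getD (p.toNat - 1) 0)) := by
                rw [hfa1]
                by_cases hp0 : p = 0
                · rw [if_pos hp0, if_pos (by omega)]
                · rw [if_neg hp0, if_neg (by omega)]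
              have hfget' : ll.getD i (none, none) =
                  ((if p.toNat = 0 then none else some (live.getD (p.toNat - 1) 0)),
                   live[p.toNat]?) := by
                rw [hfget, hprevEq, hfa3]
              obtain ⟨hEnc', hHead', hUnch⟩ := pvZ_dict hndl hip henc hhead' hfget'
                (show p.toNat ≤ live.length by omega) (by omega)
              have hins : PySem.List.insert live p i =
                  live.take p.toNat ++ i :: live.drop p.toNat := by
                have hcast : p = ((p.toNat : Nat) : Int) := by omega
                conv_lhs => rw [hcast]
                exact PySem.List.insert_natCast live p.toNat i (by omega)
              have hlenl' : (live.take p.toNat ++ i :: live.drop p.toNat).length =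
                  live.length + 1 := pvLen_insertAt ..
              have hB : pvStepB (live, pos, sB, (p, i) :: stack') c =
                  (live.take p.toNat ++ i :: live.drop p.toNat,
                   (if p ≤ pos then pos + 1 else pos),
                   PySem.List.pySetD sB i "O", stack') := by
                rw [pvStepB, hsplit]
                have h1 : op ≠ "U" := fun h => hUD (Or.inl h)
                have h2 : op ≠ "D" := fun h => hUD (Or.inr h)
                simp [h1, h2, hC, hZ, hins]
              have hA : pvStepA (ll, sA, (fprev, fnw, fnext) :: recent', kc) c =
                  ((if fprev = none then pvSetPrevAt ll fnext (some fnw)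
                    else if fnext = none then pvSetNextAt ll fprev (some fnw)
                    else pvSetNextAt (pvSetPrevAt ll fnext (some fnw)) fprev (some fnw)),
                   PySem.List.pySetD sA fnw "O", recent', kc) := by
                rw [pvStepA, hsplit]
                simp only [if_neg hUD, if_neg hC, if_pos hZ]
              rw [hA, hB]
              dsimp only
              have hllEq : (if fprev = none then pvSetPrevAt ll fnext (some fnw)
                  else if fnext = none then pvSetNextAt ll fprev (some fnw)
                  else pvSetNextAt (pvSetPrevAt ll fnext (some fnw)) fprev (some fnw)) =
                  (if (if p.toNat = 0 then none
                        else some (live.getD (p.toNat - 1) 0) : Option Int) = none then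
                    pvSetPrevAt ll live[p.toNat]? (some i)
                  else if (live[p.toNat]? : Option Int) = none then
                    pvSetNextAt ll (if p.toNat = 0 then none
                      else some (live.getD (p.toNat - 1) 0)) (some i)
                  else pvSetNextAt (pvSetPrevAt ll live[p.toNat]? (some i))
                    (if p.toNat = 0 then none else some (live.getD (p.toNat - 1) 0))
                    (some i)) := by
                rw [hprevEq, hfa2, hfa3]
              rw [hllEq]
              have hidsnd : (i :: stack'.map (·.2)).Nodup := by
                have := hnd.of_append_right
                simpa using this
              refine ⟨⟨by rw [hS, hfa2], by omega, ?_, hEnc', fun _ _ => hHead', ?_, ?_⟩, ?_⟩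
              · have := pvNodup_Z (p := p) (i := i) (stack := stack') hnd
                exact this
              · -- pvCur
                rcases hcur with ⟨h1, h2, h3⟩ | h1 | h1
                · by_cases hple : p ≤ pos
                  · rw [if_pos hple]
                    left
                    refine ⟨by omega, by rw [hlenl']; push_cast; omega, ?_⟩
                    rw [h3, pvGetD_insertAt live p.toNat i (pos + 1).toNat (by omega),
                      if_neg (by omega), if_neg (by omega)]
                    congr 2
                    omega
                  · rw [if_neg hple]
                    left
                    refine ⟨by omega, by rw [hlenl']; push_cast; omega, ?_⟩
                    rw [h3, pvGetD_insertAt live p.toNat i pos.toNat (by omega),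
                      if_pos (by omega)]
                · rw [if_neg (by omega)]
                  exact Or.inr (Or.inl h1)
                · rw [if_pos (by omega)]
                  refine Or.inr (Or.inr ?_)
                  rw [hlenl']
                  push_cast
                  omega
              · -- pvStackRel
                refine pvStackRel_congr recent' stack' _ hsr' ?_
                intro y hy
                refine hUnch y.2 ?_
                rw [pvMem_insertAt]
                rintro (h1 | h1)
                · have : y.2 ∈ stack'.map (·.2) := List.mem_map_of_mem (f := fun q => q.2) hy
                  rw [List.nodup_cons] at hidsnd
                  exact hidsnd.1 (h1 ▸ this)
                · exact pvDisjoint hnd y.2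
                    (List.mem_map_of_mem (f := fun q => q.2) (List.mem_cons_of_mem _ hy)) h1
              · -- checker state agrees
                rw [← hok',
                  show (((live.take p.toNat ++ i :: live.drop p.toNat).length : Nat) : Int) =
                      (live.length : Int) + 1 from by rw [hlenl']; push_cast; omega]
        · -- any other first token: both sides ignore the command
          rw [if_neg hC, if_neg hZ] at hok
          injection hok with hok'
          have hCne : op ≠ "U" := fun h => hUD (Or.inl h)
          have hDne : op ≠ "D" := fun h => hUD (Or.inr h)
          have hA : pvStepA (ll, sA, recent, kc) c = (ll, sA, recent, kc) := by
            rw [pvStepA, hsplit]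
            simp only [if_neg hUD, if_neg hC, if_neg hZ]
          have hB : pvStepB (live, pos, sB, stack) c = (live, pos, sB, stack) := by
            rw [pvStepB, hsplit]
            simp only [if_neg hCne, if_neg hDne, if_neg hC, if_neg hZ]
          rw [hA, hB]
          exact ⟨⟨hS, hlen1, hnd, henc, hhead, hcur, hsr⟩, by rw [← hok']⟩

-- ---- folding the simulation over the whole command list ----

lemma pvOk_foldl_none : ∀ (l : List String), l.foldl pvOk none = none := by
  intro l
  induction l with
  | nil => rfl
  | cons c cs ih => rw [List.foldl_cons]; exact ih

lemma pvFold_rel : ∀ (cmds : List String) (ll : PySem.Dict Int (Option Int × Option Int))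
    (sA : List String) (recent : List (Option Int × Int × Option Int)) (kc : Option Int)
    (live : List Int) (pos : Int) (sB : List String) (stack : List (Int × Int)),
    pvRel ll sA recent kc live pos sB stack →
    (cmds.foldl pvOk (some (pos, (live.length : Int), stack.map (·.1)))).isSome = true →
    (cmds.foldl pvStepA (ll, sA, recent, kc)).2.1 =
      (cmds.foldl pvStepB (live, pos, sB, stack)).2.2.1 := by
  intro cmds
  induction cmds with
  | nil => intro ll sA recent kc live pos sB stack hrel _; exact hrel.1
  | cons c cs ih =>
    intro ll sA recent kc live pos sB stack hrel hok
    rw [List.foldl_cons] at hok ⊢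
    rw [List.foldl_cons]
    cases hstep : pvOk (some (pos, (live.length : Int), stack.map (·.1))) c with
    | none => rw [hstep, pvOk_foldl_none] at hok; simp at hok
    | some sc' =>
      obtain ⟨hrel', hsc⟩ := pvStep_rel hrel hstep
      rw [hstep, hsc] at hok
      exact ih (pvStepA (ll, sA, recent, kc) c).1 (pvStepA (ll, sA, recent, kc) c).2.1
        (pvStepA (ll, sA, recent, kc) c).2.2.1 (pvStepA (ll, sA, recent, kc) c).2.2.2
        (pvStepB (live, pos, sB, stack) c).1 (pvStepB (live, pos, sB, stack) c).2.1
        (pvStepB (live, pos, sB, stack) c).2.2.1 (pvStepB (live, pos, sB, stack) c).2.2.2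
        hrel' hok

-- ---- the initial state is related ----

lemma pvGetD_foldl_insert {ν : Type} (f : Int → ν) (d0 : ν) :
    ∀ (l : List Int) (d : PySem.Dict Int ν) (j : Int),
      (l.foldl (fun d i => d.insert i (f i)) d).getD j d0 =
        if j ∈ l then f j else d.getD j d0 := by
  intro l
  induction l with
  | nil => intro d j; simp
  | cons a t ih =>
    intro d j
    rw [List.foldl_cons, ih]
    by_cases hjt : j ∈ t
    · rw [if_pos hjt, if_pos (by simp [hjt])]
    · rw [if_neg hjt, PySem.Dict.getD_insert]
      by_cases hja : j = a
      · rw [if_pos hja, if_pos (by simp [hja]), hja]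
      · rw [if_neg hja, if_neg (by simp [hja, hjt])]

lemma pvInit_getD (n : Int) (j : Int) (h0 : 0 ≤ j) (hj : j < n) :
    ((((PySem.List.pyRange 0 n 1).foldl
        (fun d i => d.insert i (some (i - 1), some (i + 1))) PySem.Dict.empty).insert 0
        (none, some 1)).insert (n - 1) (some (n - 2), none)).getD j (none, none) =
      (if j = n - 1 then (some (n - 2), none)
       else if j = 0 then (none, some 1) else (some (j - 1), some (j + 1))) := by
  rw [PySem.Dict.getD_insert]
  by_cases h1 : j = n - 1
  · rw [if_pos h1, if_pos h1]
  · rw [if_neg h1, if_neg h1, PySem.Dict.getD_insert]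
    by_cases h2 : j = 0
    · rw [if_pos h2, if_pos h2]
    · rw [if_neg h2, if_neg h2, pvGetD_foldl_insert,
        if_pos (PySem.List.mem_pyRange_one.2 ⟨h0, hj⟩)]

lemma pvRange_getD (n : Int) (r : Nat) (hr : r < (PySem.List.pyRange 0 n 1).length) :
    (PySem.List.pyRange 0 n 1).getD r 0 = (r : Int) := by
  rw [List.getD_eq_getElem _ 0 hr, PySem.List.getElem_pyRange_one]
  omega

lemma pvRange_get? (n : Int) (r : Nat) :
    (PySem.List.pyRange 0 n 1)[r]? = if (r : Int) < n then some (r : Int) else none := by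
  by_cases hr : (r : Int) < n
  · have hlen : r < (PySem.List.pyRange 0 n 1).length := by
      rw [PySem.List.length_pyRange_one]; omega
    rw [if_pos hr, List.getElem?_eq_getElem hlen, PySem.List.getElem_pyRange_one]
    congr 1
    omega
  · rw [if_neg hr, List.getElem?_eq_none]
    rw [PySem.List.length_pyRange_one]
    omega

lemma pvEnc_init (n : Int) (hn : 1 ≤ n) :
    pvEnc ((((PySem.List.pyRange 0 n 1).foldl
        (fun d i => d.insert i (some (i - 1), some (i + 1))) PySem.Dict.empty).insert 0
        (none, some 1)).insert (n - 1) (some (n - 2), none)) (PySem.List.pyRange 0 n 1) := by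
  intro r hr
  have hlen : (PySem.List.pyRange 0 n 1).length = n.toNat := by
    rw [PySem.List.length_pyRange_one]; omega
  rw [pvRange_getD n r hr, pvInit_getD n r (by omega) (by rw [hlen] at hr; omega)]
  rw [hlen] at hr
  constructor
  · rw [pvRange_get? n (r + 1)]
    by_cases h1 : (r : Int) = n - 1
    · rw [if_pos h1, if_neg (show ¬ ((r + 1 : Nat) : Int) < n from by omega)]
    · rw [if_neg h1, if_pos (show ((r + 1 : Nat) : Int) < n from by omega)]
      by_cases h2 : (r : Int) = 0
      · rw [if_pos h2]
        simp only [Option.some.injEq]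
        omega
      · rw [if_neg h2]
        simp only [Option.some.injEq]
        omega
  · intro hpos
    rw [pvRange_getD n (r - 1) (by rw [hlen]; omega)]
    by_cases h1 : (r : Int) = n - 1
    · rw [if_pos h1]
      simp only [Option.some.injEq]
      omega
    · rw [if_neg h1, if_neg (show ¬ (r : Int) = 0 from by omega)]
      simp only [Option.some.injEq]
      omega

lemma pvHead_init (n : Int) (hn : 1 ≤ n) :
    pvHead ((((PySem.List.pyRange 0 n 1).foldl
        (fun d i => d.insert i (some (i - 1), some (i + 1))) PySem.Dict.empty).insert 0
        (none, some 1)).insert (n - 1) (some (n - 2), none)) (PySem.List.pyRange 0 n 1) [] := by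
  intro hne h2
  have hlen : (PySem.List.pyRange 0 n 1).length = n.toNat := by
    rw [PySem.List.length_pyRange_one]; omega
  have h2' : 2 ≤ n := by
    rcases h2 with h | h
    · omega
    · exact absurd rfl h
  rw [pvRange_getD n 0 (by omega)]
  simp only [Nat.cast_zero]
  rw [pvInit_getD n 0 (by omega) (by omega), if_neg (by omega), if_pos rfl]

-- ---- harmless commands touch neither situation list ----

lemma pvStepA_harmless (st : PySem.Dict Int (Option Int × Option Int) × List String ×
    List (Option Int × Int × Option Int) × Option Int) (c : String)
    (h : pvHarmlessB c = true) : (pvStepA st c).2.1 = st.2.1 := by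
  simp only [pvHarmlessB] at h
  cases hsplit : PySem.Str.split₀ c with
  | nil => rw [hsplit] at h; exact absurd h (by simp)
  | cons op rest =>
    rw [hsplit] at h
    dsimp only at h
    rw [pvStepA, hsplit]
    dsimp only
    by_cases hUD : op = "U" ∨ op = "D"
    · rw [if_pos hUD]
    · rw [if_neg hUD] at h
      rw [decide_eq_true_iff] at h
      rw [if_neg hUD, if_neg h.1, if_neg h.2]

lemma pvStepB_harmless (st : List Int × Int × List String × List (Int × Int)) (c : String)
    (h : pvHarmlessB c = true) : (pvStepB st c).2.2.1 = st.2.2.1 := by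
  simp only [pvHarmlessB] at h
  cases hsplit : PySem.Str.split₀ c with
  | nil => rw [hsplit] at h; exact absurd h (by simp)
  | cons op rest =>
    rw [hsplit] at h
    dsimp only at h
    rw [pvStepB, hsplit]
    dsimp only
    by_cases hU : op = "U"
    · rw [if_pos hU]
    · rw [if_neg hU]
      by_cases hD : op = "D"
      · rw [if_pos hD]
      · rw [if_neg hD] at *
        rw [if_neg (fun hc => by rw [hc] at h; simp at h),
          if_neg (fun hz => by rw [hz] at h; simp at h)]

lemma pvFoldA_harmless (cmds : List String) (h : cmds.all pvHarmlessB = true) :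
    ∀ st, (cmds.foldl pvStepA st).2.1 = st.2.1 := by
  induction cmds with
  | nil => intro st; rfl
  | cons c cs ih =>
    rw [List.all_cons, Bool.and_eq_true] at h
    intro st
    rw [List.foldl_cons, ih h.2, pvStepA_harmless st c h.1]

lemma pvFoldB_harmless (cmds : List String) (h : cmds.all pvHarmlessB = true) :
    ∀ st, (cmds.foldl pvStepB st).2.2.1 = st.2.2.1 := by
  induction cmds with
  | nil => intro st; rfl
  | cons c cs ih =>
    rw [List.all_cons, Bool.and_eq_true] at h
    intro st
    rw [List.foldl_cons, ih h.2, pvStepB_harmless st c h.1]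

-- ===== VERDICT (by name: the statement is the Claim_ definition above) =====
theorem solution_spec : Claim_equal_solution := by
  intro n k cmd _ hpre
  show solution n k cmd = solution_alt n k cmd
  rcases hpre with ⟨hn, hk0, hkn, hfold⟩ | hharm
  case inr =>
    simp only [solution, solution_alt]
    rw [pvFoldA_harmless cmd hharm, pvFoldB_harmless cmd hharm]
    show PySem.Str.join "" ((PySem.List.pyRange 0 n 1).map (fun _ => "O")) = _
    rw [List.map_const', PySem.List.length_pyRange_one,
      show (n - 0).toNat = n.toNat from by omega]
  simp only [solution, solution_alt]
  have hlen : (PySem.List.pyRange 0 n 1).length = n.toNat := by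
    rw [PySem.List.length_pyRange_one]; omega
  have hrel0 : pvRel ((((PySem.List.pyRange 0 n 1).foldl
        (fun d i => d.insert i (some (i - 1), some (i + 1))) PySem.Dict.empty).insert 0
        (none, some 1)).insert (n - 1) (some (n - 2), none))
      ((PySem.List.pyRange 0 n 1).map (fun _ => "O")) [] (some k)
      (PySem.List.pyRange 0 n 1) k (List.replicate n.toNat "O") [] := by
    refine ⟨?_, by omega, by simpa using PySem.List.nodup_pyRange_one (a := 0) (b := n),
      pvEnc_init n hn, pvHead_init n hn, ?_, trivial⟩
    · rw [List.map_const', hlen]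
    · left
      refine ⟨hk0, by rw [hlen]; omega, ?_⟩
      rw [pvRange_getD n k.toNat (by rw [hlen]; omega)]
      congr 1
      omega
  have hfold' : (cmd.foldl pvOk
      (some (k, ((PySem.List.pyRange 0 n 1).length : Int),
        ([] : List (Int × Int)).map (·.1)))).isSome = true := by
    rw [show (((PySem.List.pyRange 0 n 1).length : Nat) : Int) = n from by rw [hlen]; omega]
    exact hfold
  have hmain := pvFold_rel cmd _ _ _ _ _ _ _ _ hrel0 hfold'
  exact congrArg (fun l => PySem.Str.join "" l) hmain
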